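-- pv_equiv track=rewrite | github.com/Candy-ouo/USTB_campus_game | src/player.py | _level_up
-- ===== SOURCE A (Python) =====
-- def _level_up(exp, level, current_year=None):
--     """处理等级升级逻辑"""
--     # 如果提供了当前学年，检查等级限制
--     if current_year is not None and level >= current_year:
--         # 一学年只能最高只能达到当前等级的100/100+
--         if exp >= 100:
--             exp = 100
--         return exp, level
--
--     while exp >= 100:
--         exp -= 100
--         level += 1
--         if level > 4:
--             level = 4
--             exp = 100
--             break
--         # 如果提供了当前学年，检查等级限制
--         if current_year is not None and level >= current_year:
--             break
--     return exp, level
-- ===== SOURCE B (Python) =====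
-- def _level_up(exp, level, current_year=None):
--     """处理等级升级逻辑 (closed-form: no decrement loop)"""
--     if current_year is not None and level >= current_year:
--         return (100 if exp >= 100 else exp), level
--     if exp < 100:
--         return exp, level
--     gains = exp // 100
--     k1 = max(1, 5 - level)  # first step at which the level-4 cap would fire
--     k2 = max(1, current_year - level) if current_year is not None else None
--     kb = k1 if k2 is None else min(k1, k2)
--     if kb <= gains:
--         if k2 is not None and k2 < k1:
--             return exp - 100 * k2, level + k2
--         return 100, 4
--     return exp - 100 * gains, level + gains
-- ===== Notes on version B (the rewrite author's own statement) =====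
-- stated objective: faster
-- what changed: Replaces A's 100-at-a-time decrement loop with a closed-form computation: gains = exp // 100, the first step k1 at which the level-4 cap fires and the first step k2 at which the current_year cap fires, then one arithmetic branch picks the loop's break point directly.
import Mathlib
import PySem

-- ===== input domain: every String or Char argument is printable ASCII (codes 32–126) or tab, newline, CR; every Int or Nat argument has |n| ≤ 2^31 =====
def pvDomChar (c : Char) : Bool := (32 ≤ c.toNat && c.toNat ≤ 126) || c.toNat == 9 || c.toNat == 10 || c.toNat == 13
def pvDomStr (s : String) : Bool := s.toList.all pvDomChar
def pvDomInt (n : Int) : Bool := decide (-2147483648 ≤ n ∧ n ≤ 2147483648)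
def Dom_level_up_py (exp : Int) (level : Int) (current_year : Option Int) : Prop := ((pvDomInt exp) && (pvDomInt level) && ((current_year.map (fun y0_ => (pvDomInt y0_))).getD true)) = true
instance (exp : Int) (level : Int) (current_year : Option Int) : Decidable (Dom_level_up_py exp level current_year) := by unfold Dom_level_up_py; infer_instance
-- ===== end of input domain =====

-- B replaces A's 100-at-a-time decrement loop by a closed-form arithmetic computation (simpler / constant-time).

-- ===== PORT A =====
-- A's while-loop: exp -= 100; level += 1; break on level > 4 (→ (100,4)) or level ≥ current_year
def levelUpLoop (exp : Int) (level : Int) (current_year : Option Int) : Int × Int :=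
  if h : 100 ≤ exp then
    let exp' := exp - 100
    let level' := level + 1
    if 4 < level' then (100, 4)
    else
      match current_year with
      | some y => if y ≤ level' then (exp', level') else levelUpLoop exp' level' current_year
      | none => levelUpLoop exp' level' current_year
  else (exp, level)
termination_by exp.toNat
decreasing_by omega

def level_up_py (exp : Int) (level : Int) (current_year : Option Int) : Int × Int :=
  match current_year with
  | some y =>
    if y ≤ level then ((if 100 ≤ exp then 100 else exp), level)
    else levelUpLoop exp level current_year
  | none => levelUpLoop exp level current_year

-- ===== PORT B =====
-- closed-form body shared by both current_year cases; k2 = max 1 (current_year - level) (none when no year)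
def levelUpClosed (exp : Int) (level : Int) (k2 : Option Int) : Int × Int :=
  if exp < 100 then (exp, level)
  else
    let gains := PySem.Int.floordiv exp 100
    let k1 := max 1 (5 - level)
    let kb := match k2 with | some k => min k1 k | none => k1
    if kb ≤ gains then
      match k2 with
      | some k => if k < k1 then (exp - 100 * k, level + k) else (100, 4)
      | none => (100, 4)
    else (exp - 100 * gains, level + gains)

def level_up_py_alt (exp : Int) (level : Int) (current_year : Option Int) : Int × Int :=
  match current_year with
  | some y =>
    if y ≤ level then ((if 100 ≤ exp then 100 else exp), level)
    else levelUpClosed exp level (some (max 1 (y - level)))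
  | none => levelUpClosed exp level none

-- ===== PRECONDITION & SPEC =====
def Spec_level_up_py (exp : Int) (level : Int) (current_year : Option Int) (out : Int × Int) : Prop := out = level_up_py_alt exp level current_year
instance (exp : Int) (level : Int) (current_year : Option Int) (out : Int × Int) : Decidable (Spec_level_up_py exp level current_year out) := by unfold Spec_level_up_py; infer_instance

-- ===== CLAIM (what is proved, stated in full; the proofs are below) =====
def Claim_equal_level_up_py : Prop := ∀ (exp : Int) (level : Int) (current_year : Option Int), Dom_level_up_py exp level current_year → Spec_level_up_py exp level current_year (level_up_py exp level current_year)

-- ===== LEMMAS AND PROOFS =====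

lemma fdiv_sub_100 (exp : Int) :
    PySem.Int.floordiv (exp - 100) 100 = PySem.Int.floordiv exp 100 - 1 := by
  rw [PySem.Int.floordiv_eq_ediv_of_pos (by norm_num),
      PySem.Int.floordiv_eq_ediv_of_pos (by norm_num)]
  omega

lemma one_le_gains {exp : Int} (h : 100 ≤ exp) : 1 ≤ PySem.Int.floordiv exp 100 := by
  rw [PySem.Int.floordiv_eq_ediv_of_pos (by norm_num)]
  omega

-- loop = closed form, under the invariant level < y for a given year
lemma loop_eq_closed (n : Nat) : ∀ (exp level : Int) (cy : Option Int),
    exp.toNat ≤ n → (∀ y, cy = some y → level < y) →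
    levelUpLoop exp level cy = levelUpClosed exp level (cy.map fun y => max 1 (y - level)) := by
  induction n with
  | zero =>
    intro exp level cy hn _
    have hlt : exp < 100 := by omega
    rw [levelUpLoop, levelUpClosed]
    simp [hlt, not_le.mpr hlt]
  | succ n ih =>
    intro exp level cy hn hinv
    rw [levelUpLoop]
    by_cases h : 100 ≤ exp
    · simp only [h, dif_pos]
      have hg := one_le_gains h
      have hg' : 1 ≤ exp / 100 := by
        rwa [PySem.Int.floordiv_eq_ediv_of_pos (by norm_num)] at hg
      by_cases hlev : 4 < level + 1
      · -- level-4 cap fires on the first iteration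
        simp only [hlev, if_pos]
        have hk1 : max 1 (5 - level) = 1 := by omega
        cases cy with
        | none =>
          rw [levelUpClosed]
          simp only [if_neg (by omega : ¬ exp < 100)]
          simp [hk1]
          intro hx
          omega
        | some y =>
          have hy := hinv y rfl
          rw [levelUpClosed]
          simp only [Option.map_some, if_neg (by omega : ¬ exp < 100)]
          have : min (max 1 (5 - level)) (max 1 (y - level)) = 1 := by omega
          simp [this, hk1, show ¬ max 1 (y - level) < 1 by omega]
          intro hx
          omega
      · simp only [if_neg hlev]
        cases cy with
        | none =>
          rw [ih (exp - 100) (level + 1) none (by omega) (by simp)]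
          -- shift identity: one loop step on the closed form, no year
          rw [levelUpClosed, levelUpClosed]
          simp only [Option.map_none, if_neg (by omega : ¬ exp < 100)]
          by_cases h2 : exp - 100 < 100
          · simp only [if_pos h2]
            have he1 : exp / 100 = 1 := by omega
            have : PySem.Int.floordiv exp 100 = 1 := by
              rw [PySem.Int.floordiv_eq_ediv_of_pos (by norm_num)]; omega
            simp [this, he1, show ¬ (5 ≤ 1 + level) by omega,
              show ¬ max 1 (5 - level) ≤ (1:Int) by omega]
          · simp only [if_neg h2, fdiv_sub_100]
            have hk1 : max 1 (5 - (level + 1)) = max 1 (5 - level) - 1 := by omega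
            rw [hk1]
            have hiff : (max 1 (5 - level) - 1 ≤ PySem.Int.floordiv exp 100 - 1) ↔
                (max 1 (5 - level) ≤ PySem.Int.floordiv exp 100) := by omega
            by_cases hb : max 1 (5 - level) ≤ PySem.Int.floordiv exp 100
            · rw [if_pos (hiff.mpr hb), if_pos hb]
            · simp only [if_neg hb, if_neg (fun hx => hb (hiff.mp hx))]
              simp only [Prod.mk.injEq]
              omega
        | some y =>
          have hy := hinv y rfl
          by_cases hbrk : y ≤ level + 1
          · -- year break fires on the first iteration: y = level + 1
            have hyeq : y = level + 1 := by omega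
            simp only [if_pos hbrk]
            rw [levelUpClosed]
            simp only [Option.map_some, if_neg (by omega : ¬ exp < 100)]
            have hk2 : max 1 (y - level) = 1 := by omega
            have hkb : min (max 1 (5 - level)) (max 1 (y - level)) = 1 := by omega
            rw [hk2]
            rw [if_pos (by omega : min (max 1 (5 - level)) (1:Int) ≤ PySem.Int.floordiv exp 100)]
            rw [if_pos (by omega : (1:Int) < max 1 (5 - level))]
            norm_num
          · simp only [if_neg hbrk]
            rw [ih (exp - 100) (level + 1) (some y) (by omega) (by intro z hz; cases hz; omega)]
            -- shift identity: one loop step on the closed form, with year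
            rw [levelUpClosed, levelUpClosed]
            simp only [Option.map_some, if_neg (by omega : ¬ exp < 100)]
            by_cases h2 : exp - 100 < 100
            · simp only [if_pos h2]
              have hg1 : PySem.Int.floordiv exp 100 = 1 := by
                rw [PySem.Int.floordiv_eq_ediv_of_pos (by norm_num)]; omega
              rw [if_neg (by rw [hg1]; omega)]
              rw [hg1]
              norm_num
            · simp only [if_neg h2, fdiv_sub_100]
              have hk1 : max 1 (5 - (level + 1)) = max 1 (5 - level) - 1 := by omega
              have hk2 : max 1 (y - (level + 1)) = max 1 (y - level) - 1 := by omega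
              rw [hk1, hk2]
              have hkb : min (max 1 (5 - level) - 1) (max 1 (y - level) - 1) =
                  min (max 1 (5 - level)) (max 1 (y - level)) - 1 := by omega
              rw [hkb]
              set g := PySem.Int.floordiv exp 100 with hgdef
              have hiff : (min (max 1 (5 - level)) (max 1 (y - level)) - 1 ≤ g - 1) ↔
                  (min (max 1 (5 - level)) (max 1 (y - level)) ≤ g) := by omega
              by_cases hb : min (max 1 (5 - level)) (max 1 (y - level)) ≤ g
              · simp only [if_pos hb, if_pos (hiff.mpr hb)]
                by_cases hc : max 1 (y - level) - 1 < max 1 (5 - level) - 1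
                · simp only [if_pos hc, if_pos (by omega : max 1 (y - level) < max 1 (5 - level))]
                  simp only [Prod.mk.injEq]
                  omega
                · simp [hc, show ¬ max 1 (y - level) < max 1 (5 - level) by omega]
              · simp only [if_neg hb, if_neg (fun hx => hb (hiff.mp hx))]
                simp only [Prod.mk.injEq]
                omega
    · simp only [h, dif_neg, not_false_iff]
      rw [levelUpClosed]
      simp [show exp < 100 by omega]

-- ===== VERDICT (by name: the statement is the Claim_ definition above) =====
theorem level_up_py_spec : Claim_equal_level_up_py := by
  intro exp level cy _
  unfold Spec_level_up_py level_up_py level_up_py_alt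
  cases cy with
  | none => exact loop_eq_closed exp.toNat exp level none le_rfl (by simp)
  | some y =>
    by_cases hy : y ≤ level
    · simp [hy]
    · simp only [if_neg hy]
      rw [loop_eq_closed exp.toNat exp level (some y) le_rfl (by intro z hz; cases hz; omega)]
      simp
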